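-- pv_equiv track=rewrite | github.com/maiduyen05/backend_df26_final | app/services/metrics.py | _revisit_count
-- ===== SOURCE A (Python) =====
-- def _revisit_count(seq: list) -> int:
--     seen: set = set()
--     count = 0
--     for token in seq:
--         if token in seen:
--             count += 1
--         else:
--             seen.add(token)
--     return count
-- ===== SOURCE B (Python) =====
-- def _revisit_count(seq: list) -> int:
--     return len(seq) - len(set(seq))
-- ===== Notes on version B (the rewrite author's own statement) =====
-- stated objective: simpler
-- what changed: Replaced the explicit seen-set loop with the closed form len(seq) - len(set(seq)): every occurrence beyond the first of each value contributes one repeat, so repeats = total - distinct.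
import Mathlib
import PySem

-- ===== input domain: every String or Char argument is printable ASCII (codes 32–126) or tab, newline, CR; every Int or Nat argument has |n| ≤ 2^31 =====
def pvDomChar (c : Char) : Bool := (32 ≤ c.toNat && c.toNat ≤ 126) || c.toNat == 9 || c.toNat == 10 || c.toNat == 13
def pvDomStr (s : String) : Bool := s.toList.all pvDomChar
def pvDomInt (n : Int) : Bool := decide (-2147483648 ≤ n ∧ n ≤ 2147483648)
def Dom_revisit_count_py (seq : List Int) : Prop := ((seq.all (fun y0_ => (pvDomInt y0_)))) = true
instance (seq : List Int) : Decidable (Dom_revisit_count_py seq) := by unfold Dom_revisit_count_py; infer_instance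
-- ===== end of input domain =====

-- B replaces A's seen-set loop with the closed form len(seq) - len(set(seq)) (simpler; same cost).

-- ===== PORT A =====
def revisit_count_py (seq : List Int) : Int :=
  (seq.foldl (fun (st : PySem.Set Int × Int) token =>
    if PySem.Set.contains st.1 token then (st.1, st.2 + 1)
    else (PySem.Set.add st.1 token, st.2)) (PySem.Set.empty, 0)).2

-- ===== PORT B =====
def revisit_count_py_alt (seq : List Int) : Int :=
  (seq.length : Int) - ((PySem.Set.ofList seq).length : Int)

-- ===== PRECONDITION & SPEC =====
def Spec_revisit_count_py (seq : List Int) (out : Int) : Prop := out = revisit_count_py_alt seq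
instance (seq : List Int) (out : Int) : Decidable (Spec_revisit_count_py seq out) := by unfold Spec_revisit_count_py; infer_instance

-- ===== CLAIM (what is proved, stated in full; the proofs are below) =====
def Claim_equal_revisit_count_py : Prop := ∀ (seq : List Int), Dom_revisit_count_py seq → Spec_revisit_count_py seq (revisit_count_py seq)

-- ===== LEMMAS AND PROOFS =====

-- Loop invariant for A's fold: the count equals what was processed minus the new distinct elements.
theorem revisit_count_loop (seq : List Int) (s : PySem.Set Int) (c : Int) :
    (seq.foldl (fun (st : PySem.Set Int × Int) token =>
      if PySem.Set.contains st.1 token then (st.1, st.2 + 1)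
      else (PySem.Set.add st.1 token, st.2)) (s, c)).2
    = c + (seq.length : Int) - (((PySem.Set.update s seq).length : Int) - (s.length : Int)) := by
  induction seq generalizing s c with
  | nil => simp [PySem.Set.update]
  | cons x xs ih =>
    by_cases hx : PySem.Set.contains s x = true
    · have hmem : x ∈ s := by simpa using hx
      have hadd : PySem.Set.add s x = s := by simp [PySem.Set.add, hmem]
      simp only [List.foldl_cons, hx, if_true, PySem.Set.update_cons, hadd]
      rw [ih]
      push_cast [List.length_cons]
      ring
    · have hmem : x ∉ s := by simpa using hx
      have hadd : PySem.Set.add s x = s ++ [x] := by simp [PySem.Set.add, hmem]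
      simp only [List.foldl_cons, hx, Bool.false_eq_true, if_false, PySem.Set.update_cons, hadd]
      rw [ih]
      push_cast [List.length_cons, List.length_append, List.length_nil]
      ring

-- ===== VERDICT (by name: the statement is the Claim_ definition above) =====
theorem revisit_count_py_spec : Claim_equal_revisit_count_py := by
  intro seq _
  unfold Spec_revisit_count_py revisit_count_py revisit_count_py_alt
  rw [revisit_count_loop]
  rw [← PySem.Set.update_nil_left (xs := seq)]
  simp [PySem.Set.empty]
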